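-- pv_equiv track=rewrite | github.com/gangto33/ormi3 | python/231121/coding-test.py | solution
-- ===== SOURCE A (Python) =====
-- import heapq
-- from collections import deque
--
-- def solution(n, k, enemy):
--     answer = 0
--     deq = deque(enemy)
--     heap = []
--
--     while deq and n >= 0:
--         i = -deq.popleft()
--         heapq.heappush(heap, i)
--         n += i
--         if n < 0 and k > 0:
--             k -= 1
--             n -= heapq.heappop(heap)
--         elif n < 0 and k == 0:
--             return answer
--
--         answer += 1
--
--     return answer
-- ===== SOURCE B (Python) =====
-- def solution(n, k, enemy):
--     # Event-driven two-level loop: the inner scan advances through affordable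
--     # rounds keeping only a running budget and an append-only list of taken
--     # enemies; each outer iteration resolves one unaffordable round by picking
--     # the largest taken enemy (linear max/remove) and spending a skip on it.
--     # No priority structure is maintained.
--     if n < 0:
--         return 0
--     budget = n
--     kept = []          # enemies taken so far and not skipped (multiset)
--     i = 0
--     while True:
--         while i < len(enemy) and budget >= enemy[i]:
--             kept.append(enemy[i])
--             budget -= enemy[i]
--             i += 1
--         if i == len(enemy) or k <= 0:
--             return i
--         kept.append(enemy[i])
--         m = max(kept)
--         kept.remove(m)
--         budget += m - enemy[i]
--         k -= 1
--         i += 1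
-- ===== Notes on version B (the rewrite author's own statement) =====
-- stated objective: alternative
-- what changed: Replaces A's single branching pass that maintains a negated min-heap per element by an event-driven two-level loop: an inner scan advances through affordable rounds with only a running budget and an append-only list of taken enemies, and each outer iteration resolves one unaffordable round by a linear max/remove over that list; no priority structure is maintained.
-- intended difference: For k < 0 with n >= 0 and some prefix of enemy summing to more than n, A falls through both skip branches and counts the fatal round (returning the 1-based index f of the first unaffordable round), while B ends the game there and returns f-1, the number of rounds actually survived, which is the intended count. — e.g. on solution(0, -1, [1]): A returns 1, B returns 0
import Mathlib
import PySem

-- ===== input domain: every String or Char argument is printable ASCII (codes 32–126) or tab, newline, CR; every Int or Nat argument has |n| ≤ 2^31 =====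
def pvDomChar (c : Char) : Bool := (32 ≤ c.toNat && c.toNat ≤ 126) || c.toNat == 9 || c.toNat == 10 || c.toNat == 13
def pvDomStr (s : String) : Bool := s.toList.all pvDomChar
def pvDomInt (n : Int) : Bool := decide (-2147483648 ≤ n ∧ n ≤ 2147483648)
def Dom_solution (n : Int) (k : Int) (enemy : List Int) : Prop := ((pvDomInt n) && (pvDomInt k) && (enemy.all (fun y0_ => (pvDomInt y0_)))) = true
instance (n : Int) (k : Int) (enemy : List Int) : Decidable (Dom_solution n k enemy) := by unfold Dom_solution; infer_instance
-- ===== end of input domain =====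

-- B replaces A's per-element heap maintenance by an event-driven two-level loop (inner scan
-- through affordable rounds with a running budget, one linear max/remove per skip event):
-- an alternative decomposition of the same game, not claimed faster.

-- ===== PORT A =====
-- heapq.heappush / heapq.heappop are library calls, ported by their contract with the min-heap
-- modeled as an ascending sorted list: push = sorted insert, pop = remove the head (the minimum).
-- On Int values this is observationally exact: heappop returns the minimum of the heap's contents
-- and the multiset of contents is preserved, which is all this program observes of the heap.
def pyHeappush (heap : List Int) (item : Int) : List Int :=
  List.orderedInsert (· ≤ ·) item heap

def solutionGo : List Int → Int → Int → List Int → Int → Int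
  | [], _, _, _, answer => answer
  | e :: rest, n, k, heap, answer =>
    if n < 0 then answer          -- the 'while deq and n >= 0' loop condition
    else
      let i := -e                 -- i = -deq.popleft()
      let heap' := pyHeappush heap i
      let n' := n + i
      if n' < 0 ∧ k > 0 then
        -- n -= heapq.heappop(heap): the head of the sorted heap is its minimum
        solutionGo rest (n' - heap'.headI) (k - 1) heap'.tail (answer + 1)
      else if n' < 0 ∧ k = 0 then answer
      else solutionGo rest n' k heap' (answer + 1)

def solution (n : Int) (k : Int) (enemy : List Int) : Int :=
  solutionGo enemy n k [] 0

-- ===== PORT B =====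
-- the inner 'while i < len(enemy) and budget >= enemy[i]' loop of Source B:
-- returns (remaining enemies, budget, kept, rounds) at its exit
def altAdvance : List Int → Int → List Int → Int → (List Int × Int × List Int × Int)
  | [], b, kept, i => ([], b, kept, i)
  | e :: rest, b, kept, i =>
    if e ≤ b then altAdvance rest (b - e) (kept ++ [e]) (i + 1)
    else (e :: rest, b, kept, i)

-- the outer 'while True' loop of Source B: one iteration per skip event.  The Nat fuel only makes
-- the recursion structural; with fuel > length of the remaining list it is never exhausted
-- (each outer iteration strictly shortens the list), so the loop itself is unchanged.
def altOuterF : Nat → List Int → Int → Int → List Int → Int → Int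
  | 0, _, _, _, _, i => i
  | fuel + 1, rest, b, k, kept, i =>
    let s := altAdvance rest b kept i
    match s.1 with
    | [] => s.2.2.2
    | e :: r'' =>
      if k ≤ 0 then s.2.2.2
      else
        let kept2 := s.2.2.1 ++ [e]                                 -- kept.append(enemy[i])
        let m := (PySem.List.max? kept2 (fun x => x)).getD 0        -- m = max(kept); kept2 ≠ []
        let kept3 := (PySem.List.remove? kept2 m).getD []           -- kept.remove(m); m ∈ kept2
        altOuterF fuel r'' (s.2.1 + m - e) (k - 1) kept3 (s.2.2.2 + 1)

def solution_alt (n : Int) (k : Int) (enemy : List Int) : Int :=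
  if n < 0 then 0 else altOuterF (enemy.length + 1) enemy n k [] 0

-- ===== PRECONDITION & SPEC =====
-- helper for D_: some prefix of enemy sums to more than n (a boundary relation on the input)
def pfail (b : Int) (xs : List Int) : Bool :=
  (List.range (xs.length + 1)).any (fun m => decide (b < (xs.take m).sum))

-- For k < 0 with n ≥ 0 and some prefix of enemy summing to more than n, A falls through both skip
-- branches and counts the fatal round (returning the 1-based index f of the first unaffordable
-- round), while B ends the game there and returns f-1, the number of rounds actually survived,
-- which is the intended count.
def D_solution (n : Int) (k : Int) (enemy : List Int) : Prop :=
  k < 0 ∧ 0 ≤ n ∧ pfail n enemy = true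
instance (n : Int) (k : Int) (enemy : List Int) : Decidable (D_solution n k enemy) := by
  unfold D_solution; infer_instance

def Spec_solution (n : Int) (k : Int) (enemy : List Int) (out : Int) : Prop :=
  ¬ D_solution n k enemy → out = solution_alt n k enemy
instance (n : Int) (k : Int) (enemy : List Int) (out : Int) : Decidable (Spec_solution n k enemy out) := by
  unfold Spec_solution; infer_instance

def pvDiffWitness_solution : Int × Int × List Int := (0, -1, [1])
def pvDiffWitnessOut_solution : Int × Int := (1, 0)

-- ===== CLAIM (what is proved, stated in full; the proofs are below) =====
def Claim_unchanged_solution : Prop := ∀ (n : Int) (k : Int) (enemy : List Int), Dom_solution n k enemy → Spec_solution n k enemy (solution n k enemy)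
def Claim_changed_solution : Prop := Dom_solution (pvDiffWitness_solution.1) (pvDiffWitness_solution.2.1) (pvDiffWitness_solution.2.2) ∧ D_solution (pvDiffWitness_solution.1) (pvDiffWitness_solution.2.1) (pvDiffWitness_solution.2.2) ∧ solution (pvDiffWitness_solution.1) (pvDiffWitness_solution.2.1) (pvDiffWitness_solution.2.2) = pvDiffWitnessOut_solution.1 ∧ solution_alt (pvDiffWitness_solution.1) (pvDiffWitness_solution.2.1) (pvDiffWitness_solution.2.2) = pvDiffWitnessOut_solution.2 ∧ pvDiffWitnessOut_solution.1 ≠ pvDiffWitnessOut_solution.2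
def Claim_exact_solution : Prop := ∀ (n : Int) (k : Int) (enemy : List Int), Dom_solution n k enemy → D_solution n k enemy → solution n k enemy ≠ solution_alt n k enemy

-- ===== LEMMAS AND PROOFS =====

-- A's loop exits immediately on a negative budget
theorem go_of_neg (xs : List Int) (n k : Int) (heap : List Int) (ans : Int) (h : n < 0) :
    solutionGo xs n k heap ans = ans := by
  cases xs <;> simp [solutionGo, h]

theorem altF_nil (fuel : Nat) (b k : Int) (kept : List Int) (i : Int) :
    altOuterF fuel [] b k kept i = i := by
  cases fuel <;> simp [altOuterF, altAdvance]

-- unfolding B's outer loop when the next round is affordable: the inner loop takes one step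
theorem altF_step (f : Nat) (e : Int) (rest : List Int) (b k : Int) (kept : List Int) (i : Int)
    (h : e ≤ b) :
    altOuterF (f + 1) (e :: rest) b k kept i
      = altOuterF (f + 1) rest (b - e) k (kept ++ [e]) (i + 1) := by
  simp only [altOuterF, altAdvance, if_pos h]

-- unfolding B's outer loop when the next round is unaffordable: the inner loop exits at once
theorem altF_fail (f : Nat) (e : Int) (rest : List Int) (b k : Int) (kept : List Int) (i : Int)
    (h : ¬ e ≤ b) :
    altOuterF (f + 1) (e :: rest) b k kept i =
      if k ≤ 0 then i
      else
        altOuterF f rest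
          (b + ((PySem.List.max? (kept ++ [e]) (fun x => x)).getD 0) - e) (k - 1)
          ((PySem.List.remove? (kept ++ [e])
            ((PySem.List.max? (kept ++ [e]) (fun x => x)).getD 0)).getD []) (i + 1) := by
  simp only [altOuterF, altAdvance, if_neg h]

-- the sorted heap against Source B's unordered kept list: same multiset under negation
theorem heappush_perm (heap : List Int) (x : Int) : (pyHeappush heap x).Perm (x :: heap) :=
  List.perm_orderedInsert _ _ _

theorem heappush_pairwise {heap : List Int} (x : Int) (h : heap.Pairwise (· ≤ ·)) :
    (pyHeappush heap x).Pairwise (· ≤ ·) :=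
  List.Pairwise.orderedInsert _ _ h

-- pushing -e keeps the heap permuting the negation of kept ++ [e]
theorem heappush_perm_append {heap kept : List Int} (e : Int)
    (hp : heap.Perm (kept.map (fun a => -a))) :
    (pyHeappush heap (-e)).Perm ((kept ++ [e]).map (fun a => -a)) := by
  have h1 : (pyHeappush heap (-e)).Perm ((-e) :: kept.map (fun a => -a)) :=
    (heappush_perm heap (-e)).trans (hp.cons (-e))
  refine h1.trans ?_
  simpa using (List.perm_middle (l₁ := kept.map (fun a => -a)) (l₂ := ([] : List Int))
    (a := -e)).symm

-- the head of a sorted nonempty heap permuting the negated kept list is minus kept's maximum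
theorem head_eq_neg_max {heap kept : List Int} {m : Int}
    (hs : heap.Pairwise (· ≤ ·)) (hp : heap.Perm (kept.map (fun a => -a)))
    (hm : PySem.List.max? kept (fun x => x) = some m) :
    ∃ t, heap = (-m) :: t ∧ t.Pairwise (· ≤ ·) ∧ t.Perm ((kept.erase m).map (fun a => -a)) := by
  have hmem : m ∈ kept := PySem.List.max?_mem hm
  have hmax : ∀ y ∈ kept, y ≤ m := fun y hy => PySem.List.max?_isMax hm y hy
  have hmemh : (-m) ∈ heap := hp.mem_iff.mpr (List.mem_map.mpr ⟨m, hmem, rfl⟩)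
  have hlo : ∀ z ∈ heap, -m ≤ z := by
    intro z hz
    obtain ⟨y, hy, rfl⟩ := List.mem_map.mp (hp.mem_iff.mp hz)
    have := hmax y hy; omega
  obtain ⟨h0, t, rfl⟩ : ∃ h0 t, heap = h0 :: t := by
    cases heap with
    | nil => simp at hmemh
    | cons h0 t => exact ⟨h0, t, rfl⟩
  have hh0 : h0 = -m := by
    have h1 := hlo h0 (List.mem_cons_self)
    rcases List.mem_cons.mp hmemh with h2 | h2
    · omega
    · have := (List.pairwise_cons.mp hs).1 (-m) h2; omega
  subst hh0
  refine ⟨t, rfl, (List.pairwise_cons.mp hs).2, ?_⟩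
  have h2 := hp.erase (-m)
  rw [List.erase_cons_head] at h2
  have h3 : ((kept.map (fun a => -a)).erase (-m)) = (kept.erase m).map (fun a => -a) := by
    rw [List.map_erase (neg_injective : Function.Injective (fun a : Int => -a))]
  rw [h3] at h2
  exact h2

-- main invariant for k ≥ 0: A's heap is the sorted negation of B's kept list,
-- budgets and round counts coincide
theorem main_eq : ∀ (xs : List Int) (fuel : Nat) (n k : Int) (heap kept : List Int) (ans : Int),
    xs.length < fuel → 0 ≤ n → 0 ≤ k →
    heap.Pairwise (· ≤ ·) → heap.Perm (kept.map (fun a => -a)) →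
    solutionGo xs n k heap ans = altOuterF fuel xs n k kept ans := by
  intro xs
  induction xs with
  | nil =>
    intro fuel n k heap kept ans _ _ _ _ _
    simp [solutionGo, altF_nil]
  | cons e rest ih =>
    intro fuel n k heap kept ans hfuel hn hk hs hp
    obtain ⟨f, rfl⟩ : ∃ f, fuel = f + 1 := ⟨fuel - 1, by omega⟩
    have hnn : ¬ (n < 0) := by omega
    simp only [solutionGo, if_neg hnn]
    by_cases he : e ≤ n
    · -- affordable round: both sides just take it
      rw [if_neg (by omega : ¬ (n + -e < 0 ∧ k > 0)),
          if_neg (by omega : ¬ (n + -e < 0 ∧ k = 0)),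
          altF_step f e rest n k kept ans he]
      have harg : n + -e = n - e := by ring
      rw [harg]
      exact ih (f + 1) (n - e) k _ _ (ans + 1) (by simp only [List.length_cons] at hfuel; omega) (by omega) hk
        (heappush_pairwise _ hs) (heappush_perm_append e hp)
    · -- unaffordable round
      rw [altF_fail f e rest n k kept ans he]
      obtain ⟨m, hm⟩ : ∃ m, PySem.List.max? (kept ++ [e]) (fun x => x) = some m := by
        cases h : PySem.List.max? (kept ++ [e]) (fun x => x) with
        | none =>
          have : (kept ++ [e]) = [] := (PySem.List.max?_eq_none_iff _ _).mp h
          simp at this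
        | some m => exact ⟨m, rfl⟩
      have hem : e ≤ m := PySem.List.max?_isMax hm e (by simp)
      by_cases hkpos : k > 0
      · rw [if_pos (by constructor <;> omega), if_neg (by omega : ¬ k ≤ 0)]
        obtain ⟨t, hht, hts, htp⟩ :=
          head_eq_neg_max (heappush_pairwise _ hs) (heappush_perm_append e hp) hm
        have hmm : m ∈ kept ++ [e] := PySem.List.max?_mem hm
        simp only [hm, Option.getD_some]
        rw [PySem.List.remove?_eq_some_erase (kept ++ [e]) m hmm, hht]
        simp only [Option.getD_some, List.headI, List.tail_cons]
        have harg : n + -e - -m = n + m - e := by ring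
        rw [harg]
        exact ih f (n + m - e) (k - 1) t _ (ans + 1) (by simp only [List.length_cons] at hfuel; omega) (by omega)
          (by omega) hts htp
      · have hk0 : k = 0 := by omega
        rw [if_neg (by omega : ¬ (n + -e < 0 ∧ k > 0)),
            if_pos (by constructor <;> omega), if_pos (by omega : k ≤ 0)]

theorem pfail_nil (b : Int) : pfail b [] = true ↔ b < 0 := by
  simp [pfail, List.range_succ]

theorem pfail_cons {b : Int} (e : Int) (xs : List Int) (hb : 0 ≤ b) :
    (pfail b (e :: xs) = true) ↔ (pfail (b - e) xs = true) := by
  simp only [pfail, List.any_eq_true, List.mem_range, decide_eq_true_eq]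
  constructor
  · rintro ⟨m, hm, hlt⟩
    cases m with
    | zero => simp at hlt; omega
    | succ j =>
      refine ⟨j, by simp at hm ⊢; omega, ?_⟩
      rw [List.take_succ_cons, List.sum_cons] at hlt; omega
  · rintro ⟨j, hj, hlt⟩
    refine ⟨j + 1, by simp at hj ⊢; omega, ?_⟩
    rw [List.take_succ_cons, List.sum_cons]; omega

-- an unaffordable first round witnesses pfail
theorem pfail_first (b e : Int) (xs : List Int) (h : b < e) : pfail b (e :: xs) = true := by
  simp only [pfail, List.any_eq_true, List.mem_range, decide_eq_true_eq]
  exact ⟨1, by simp, by simpa using h⟩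

-- for k < 0 with no unaffordable prefix both programs just count every round
theorem kneg_eq : ∀ (xs : List Int) (fuel : Nat) (n k : Int) (heap kept : List Int) (ans : Int),
    xs.length < fuel → k < 0 → 0 ≤ n → pfail n xs = false →
    solutionGo xs n k heap ans = altOuterF fuel xs n k kept ans := by
  intro xs
  induction xs with
  | nil => intros; simp [solutionGo, altF_nil]
  | cons e rest ih =>
    intro fuel n k heap kept ans hfuel hk hn hpf
    obtain ⟨f, rfl⟩ : ∃ f, fuel = f + 1 := ⟨fuel - 1, by omega⟩
    have hnn : ¬ (n < 0) := by omega
    have hpft : ¬ pfail n (e :: rest) = true := by simp [hpf]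
    have he : e ≤ n := by
      by_contra hgt
      exact hpft (pfail_first n e rest (by omega))
    have hpf' : pfail (n - e) rest = false := by
      rw [Bool.eq_false_iff]
      exact fun h => hpft ((pfail_cons e rest hn).mpr h)
    simp only [solutionGo, if_neg hnn]
    rw [if_neg (by omega : ¬ (n + -e < 0 ∧ k > 0)),
        if_neg (by omega : ¬ (n + -e < 0 ∧ k = 0)),
        altF_step f e rest n k kept ans he]
    have harg : n + -e = n - e := by ring
    rw [harg]
    exact ih (f + 1) (n - e) k _ (kept ++ [e]) (ans + 1) (by simp only [List.length_cons] at hfuel; omega) hk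
      (by omega) hpf'

-- for k < 0 with an unaffordable prefix A counts one round more than B
theorem kneg_diff : ∀ (xs : List Int) (fuel : Nat) (n k : Int) (heap kept : List Int) (ans : Int),
    xs.length < fuel → k < 0 → 0 ≤ n → pfail n xs = true →
    solutionGo xs n k heap ans = altOuterF fuel xs n k kept ans + 1 := by
  intro xs
  induction xs with
  | nil =>
    intro fuel n k heap kept ans _ _ hn hpf
    exact absurd ((pfail_nil _).mp hpf) (by omega)
  | cons e rest ih =>
    intro fuel n k heap kept ans hfuel hk hn hpf
    obtain ⟨f, rfl⟩ : ∃ f, fuel = f + 1 := ⟨fuel - 1, by omega⟩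
    have hnn : ¬ (n < 0) := by omega
    simp only [solutionGo, if_neg hnn]
    by_cases he : e ≤ n
    · have hpf' : pfail (n - e) rest = true := (pfail_cons e rest hn).mp hpf
      rw [if_neg (by omega : ¬ (n + -e < 0 ∧ k > 0)),
          if_neg (by omega : ¬ (n + -e < 0 ∧ k = 0)),
          altF_step f e rest n k kept ans he]
      have harg : n + -e = n - e := by ring
      rw [harg]
      exact ih (f + 1) (n - e) k _ (kept ++ [e]) (ans + 1) (by simp only [List.length_cons] at hfuel; omega) hk
        (by omega) hpf'
    · rw [if_neg (by omega : ¬ (n + -e < 0 ∧ k > 0)),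
          if_neg (by omega : ¬ (n + -e < 0 ∧ k = 0)),
          altF_fail f e rest n k kept ans he, if_pos (by omega : k ≤ 0)]
      exact go_of_neg rest _ k _ (ans + 1) (by omega)

-- ===== VERDICT (by name: the statement is the Claim_ definition above) =====
theorem solution_spec : Claim_unchanged_solution := by
  unfold Claim_unchanged_solution
  intro n k enemy _
  unfold Spec_solution
  intro hnd
  unfold solution solution_alt
  by_cases hn : n < 0
  · rw [if_pos hn, go_of_neg _ _ _ _ _ hn]
  · rw [if_neg hn]
    by_cases hk : 0 ≤ k
    · exact main_eq enemy (enemy.length + 1) n k [] [] 0 (by omega) (by omega) hk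
        (by simp) (by simp)
    · have hkneg : k < 0 := by omega
      unfold D_solution at hnd
      push Not at hnd
      have hpf : pfail n enemy = false := by
        rw [Bool.eq_false_iff]; exact hnd hkneg (by omega)
      exact kneg_eq enemy (enemy.length + 1) n k [] [] 0 (by omega) hkneg (by omega) hpf

theorem solution_changed : Claim_changed_solution := by
  unfold Claim_changed_solution; decide

theorem solution_tight : Claim_exact_solution := by
  unfold Claim_exact_solution
  intro n k enemy _ hD
  obtain ⟨hk, hn, hpf⟩ := hD
  unfold solution solution_alt
  rw [if_neg (by omega : ¬ n < 0)]
  have h := kneg_diff enemy (enemy.length + 1) n k [] [] 0 (by omega) hk (by omega) hpf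
  omega
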